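-- pv_equiv track=rewrite | github.com/hqyang/BertTest | src/preprocess.py | words2dict_tuple
-- ===== SOURCE A (Python) =====
-- def words2dict_tuple(words: list, word_dict: list, max_gram: int): #-> tuple
--     # the output tuple stores the indexes to indicate the words appear in the dict
--
--     if max_gram <= 1:
--         raise ValueError('max gram should be greater than 1')
--
--     if not words:
--         return []
--
--     res = []
--
--     # for each char,
--     for char_ind, char in enumerate(words):
--         #char_res = [0]*(2*(max_gram - 1))
--         for rel_ind in range(1, max_gram):
--             if char_ind - rel_ind >= 0:
--                 # construct words
--                 sent = ''.join(words[char_ind - rel_ind:char_ind + 1])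
--                 if sent in word_dict:
--                     # char_res[2*(rel_ind - 1)] = 1
--                     idx_res = (char_ind, 2*(rel_ind - 1))
--                     res.append(idx_res)
--
--             if char_ind + rel_ind < len(words):
--                 sent = ''.join(words[char_ind:char_ind + rel_ind + 1])
--                 if sent in word_dict:
--                     #char_res[2*rel_ind - 1] = 1
--                     idx_res = (char_ind, 2*rel_ind - 1)
--                     res.append(idx_res)
--
--
--         #res.append(char_res)
--
--     #if len(words) < max_length:
--     #    res.extend([[0]*(2*(max_gram - 1))] * (max_length - len(words)))
--     return res
-- ===== SOURCE B (Python) =====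
-- def words2dict_tuple(words: list, word_dict: list, max_gram: int):
--     # single pass over substring windows; record at both endpoints, then order by (char_ind, offset)
--     if max_gram <= 1:
--         raise ValueError('max gram should be greater than 1')
--     res = []
--     n = len(words)
--     for i in range(n):
--         for j in range(i + 1, min(i + max_gram, n)):
--             if ''.join(words[i:j + 1]) in word_dict:
--                 res.append((j, 2 * (j - i) - 2))
--                 res.append((i, 2 * (j - i) - 1))
--     return sorted(res)
-- ===== Notes on version B (the rewrite author's own statement) =====
-- stated objective: alternative
-- what changed: A scans per character in both directions, joining every window twice with interleaved conditional appends; B enumerates each substring window [i, j] once, joins and tests it once, records a hit at both endpoints, and recovers A's output order with one final sort on (char_ind, offset).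
import Mathlib
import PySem

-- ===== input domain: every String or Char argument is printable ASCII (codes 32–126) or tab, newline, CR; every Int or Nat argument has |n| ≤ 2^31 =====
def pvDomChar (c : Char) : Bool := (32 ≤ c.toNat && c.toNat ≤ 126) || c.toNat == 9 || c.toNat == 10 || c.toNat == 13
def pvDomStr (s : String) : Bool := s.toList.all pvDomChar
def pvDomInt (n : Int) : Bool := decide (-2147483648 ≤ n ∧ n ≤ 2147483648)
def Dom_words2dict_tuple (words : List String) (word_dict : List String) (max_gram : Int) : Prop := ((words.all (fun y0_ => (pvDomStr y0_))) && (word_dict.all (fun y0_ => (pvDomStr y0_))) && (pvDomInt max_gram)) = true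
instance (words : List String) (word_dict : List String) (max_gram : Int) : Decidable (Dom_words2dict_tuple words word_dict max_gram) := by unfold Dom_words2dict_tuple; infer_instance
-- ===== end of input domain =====

-- B replaces A's per-character bidirectional scan by a single pass over substring windows
-- (each dictionary hit recorded at both endpoints) followed by one sort by (char_ind, offset):
-- same output, different decomposition ("alternative"; return value only, no mutation involved).

-- ===== PORT A =====
def words2dict_tuple (words : List String) (word_dict : List String) (max_gram : Int) : List (Int × Int) :=
  if max_gram ≤ 1 then []  -- Python raises ValueError here; excluded by Pre_words2dict_tuple
  else if words = [] then []
  else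
    (PySem.List.enumerate words 0).foldl (fun res ci =>
      (PySem.List.pyRange 1 max_gram 1).foldl (fun res relInd =>
        let res :=
          if 0 ≤ ci.1 - relInd then
            let sent := PySem.Str.join "" (PySem.List.slice words (some (ci.1 - relInd)) (some (ci.1 + 1)))
            if word_dict.contains sent then res ++ [(ci.1, 2 * (relInd - 1))] else res
          else res
        if ci.1 + relInd < PySem.List.len words then
          let sent := PySem.Str.join "" (PySem.List.slice words (some ci.1) (some (ci.1 + relInd + 1)))
          if word_dict.contains sent then res ++ [(ci.1, 2 * relInd - 1)] else res
        else res) res) []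

-- ===== PORT B =====
def words2dict_tuple_alt (words : List String) (word_dict : List String) (max_gram : Int) : List (Int × Int) :=
  if max_gram ≤ 1 then []  -- Python raises ValueError here; excluded by Pre_words2dict_tuple
  else
    let n := PySem.List.len words
    let res := (PySem.List.pyRange 0 n 1).foldl (fun res i =>
      (PySem.List.pyRange (i + 1) (min (i + max_gram) n) 1).foldl (fun res j =>
        if word_dict.contains (PySem.Str.join "" (PySem.List.slice words (some i) (some (j + 1)))) then
          res ++ [(j, 2 * (j - i) - 2), (i, 2 * (j - i) - 1)]
        else res) res) []
    PySem.List.sorted2 res (fun p => p.1) (fun p => p.2)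

-- ===== PRECONDITION & SPEC =====
-- Pre_ excludes exactly max_gram <= 1, where the Python A raises ValueError.
def Pre_words2dict_tuple (words : List String) (word_dict : List String) (max_gram : Int) : Prop := 2 ≤ max_gram
instance (words : List String) (word_dict : List String) (max_gram : Int) : Decidable (Pre_words2dict_tuple words word_dict max_gram) := by unfold Pre_words2dict_tuple; infer_instance
def pvWitness_words2dict_tuple : List String × List String × Int := (["a", "b"], ["ab"], 2)

def Spec_words2dict_tuple (words : List String) (word_dict : List String) (max_gram : Int) (out : List (Int × Int)) : Prop := out = words2dict_tuple_alt words word_dict max_gram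
instance (words : List String) (word_dict : List String) (max_gram : Int) (out : List (Int × Int)) : Decidable (Spec_words2dict_tuple words word_dict max_gram out) := by unfold Spec_words2dict_tuple; infer_instance

-- ===== CLAIM (what is proved, stated in full; the proofs are below) =====
def Claim_equal_words2dict_tuple : Prop := ∀ (words : List String) (word_dict : List String) (max_gram : Int), Dom_words2dict_tuple words word_dict max_gram → Pre_words2dict_tuple words word_dict max_gram → Spec_words2dict_tuple words word_dict max_gram (words2dict_tuple words word_dict max_gram)

-- ===== LEMMAS AND PROOFS =====

-- membership test 'join(words[i:j+1]) in word_dict' for the window [i, j]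
def pvWin (words word_dict : List String) (i j : Int) : Bool :=
  word_dict.contains (PySem.Str.join "" (PySem.List.slice words (some i) (some (j + 1))))

-- A's backward entry at centre c, relative index r (window [c-r, c])
def pvBack (words word_dict : List String) (c r : Int) : List (Int × Int) :=
  if 0 ≤ c - r then (if pvWin words word_dict (c - r) c then [(c, 2 * (r - 1))] else []) else []

-- A's forward entry at centre c, relative index r (window [c, c+r])
def pvFwd (words word_dict : List String) (c r : Int) : List (Int × Int) :=
  if c + r < PySem.List.len words then (if pvWin words word_dict c (c + r) then [(c, 2 * r - 1)] else []) else []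

-- B's two entries for the window [i, j]
def pvWinE (words word_dict : List String) (i j : Int) : List (Int × Int) :=
  if pvWin words word_dict i j = true then [(j, 2 * (j - i) - 2), (i, 2 * (j - i) - 1)] else []

def pvAlist (words word_dict : List String) (max_gram : Int) : List (Int × Int) :=
  (PySem.List.pyRange 0 (PySem.List.len words) 1).flatMap (fun c =>
    (PySem.List.pyRange 1 max_gram 1).flatMap (fun r =>
      pvBack words word_dict c r ++ pvFwd words word_dict c r))

def pvBlist (words word_dict : List String) (max_gram : Int) : List (Int × Int) :=
  (PySem.List.pyRange 0 (PySem.List.len words) 1).flatMap (fun i =>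
    (PySem.List.pyRange (i + 1) (min (i + max_gram) (PySem.List.len words)) 1).flatMap
      (pvWinE words word_dict i))

-- the lexicographic sort key Python's sorted() uses on the pairs
def pvKey (p : Int × Int) : Int ×ₗ Int := toLex p

lemma mem_pvBack {words word_dict : List String} {c r : Int} {x : Int × Int}
    (h : x ∈ pvBack words word_dict c r) : x = (c, 2 * (r - 1)) := by
  unfold pvBack at h; split_ifs at h <;> simp_all

lemma mem_pvFwd {words word_dict : List String} {c r : Int} {x : Int × Int}
    (h : x ∈ pvFwd words word_dict c r) : x = (c, 2 * r - 1) := by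
  unfold pvFwd at h; split_ifs at h <;> simp_all

lemma mem_pvWinE {words word_dict : List String} {i j : Int} {x : Int × Int}
    (h : x ∈ pvWinE words word_dict i j) :
    x = (j, 2 * (j - i) - 2) ∨ x = (i, 2 * (j - i) - 1) := by
  unfold pvWinE at h; split_ifs at h <;> simp_all

lemma pvMem_Blist (words word_dict : List String) (max_gram : Int) (p : Int × Int) :
    p ∈ pvBlist words word_dict max_gram ↔
      ∃ i j : Int, 0 ≤ i ∧ i < j ∧ j < PySem.List.len words ∧ j - i < max_gram ∧
        pvWin words word_dict i j = true ∧
        (p = (j, 2 * (j - i) - 2) ∨ p = (i, 2 * (j - i) - 1)) := by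
  constructor
  · intro hmem
    simp only [pvBlist, List.mem_flatMap, PySem.List.mem_pyRange_one] at hmem
    obtain ⟨i, ⟨hi0, _⟩, j, ⟨hj1, hj2⟩, hp⟩ := hmem
    by_cases hw : pvWin words word_dict i j = true
    · exact ⟨i, j, hi0, by omega, by omega, by omega, hw, mem_pvWinE hp⟩
    · unfold pvWinE at hp; rw [if_neg hw] at hp; simp at hp
  · rintro ⟨i, j, hi0, hij, hjn, hg, hw, hp⟩
    simp only [pvBlist, List.mem_flatMap, PySem.List.mem_pyRange_one]
    refine ⟨i, ⟨hi0, by omega⟩, j, ⟨by omega, by omega⟩, ?_⟩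
    unfold pvWinE; rw [if_pos hw]
    rcases hp with h | h <;> simp [h]

lemma pvMem_Alist (words word_dict : List String) (max_gram : Int) (p : Int × Int) :
    p ∈ pvAlist words word_dict max_gram ↔
      ∃ i j : Int, 0 ≤ i ∧ i < j ∧ j < PySem.List.len words ∧ j - i < max_gram ∧
        pvWin words word_dict i j = true ∧
        (p = (j, 2 * (j - i) - 2) ∨ p = (i, 2 * (j - i) - 1)) := by
  constructor
  · intro hmem
    simp only [pvAlist, List.mem_flatMap, PySem.List.mem_pyRange_one] at hmem
    obtain ⟨c, ⟨hc0, hcn⟩, r, ⟨hr1, hr2⟩, hp⟩ := hmem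
    rcases List.mem_append.1 hp with hb | hf
    · have hx := mem_pvBack hb
      have hcond : 0 ≤ c - r ∧ pvWin words word_dict (c - r) c = true := by
        unfold pvBack at hb; split_ifs at hb with h1 h2
        · exact ⟨h1, h2⟩
        · simp at hb
        · simp at hb
      refine ⟨c - r, c, by omega, by omega, by omega, by omega, hcond.2, Or.inl ?_⟩
      rw [hx, Prod.mk.injEq]; constructor
      · rfl
      · omega
    · have hx := mem_pvFwd hf
      have hcond : c + r < PySem.List.len words ∧ pvWin words word_dict c (c + r) = true := by
        unfold pvFwd at hf; split_ifs at hf with h1 h2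
        · exact ⟨h1, h2⟩
        · simp at hf
        · simp at hf
      refine ⟨c, c + r, by omega, by omega, by omega, by omega, hcond.2, Or.inr ?_⟩
      rw [hx, Prod.mk.injEq]; constructor
      · rfl
      · omega
  · rintro ⟨i, j, hi0, hij, hjn, hg, hw, hp⟩
    simp only [pvAlist, List.mem_flatMap, PySem.List.mem_pyRange_one]
    rcases hp with h | h
    · refine ⟨j, ⟨by omega, by omega⟩, j - i, ⟨by omega, by omega⟩, List.mem_append.2 (Or.inl ?_)⟩
      unfold pvBack
      have hji : j - (j - i) = i := by omega
      rw [hji, if_pos (by omega), if_pos hw, h]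
      simp only [List.mem_singleton, Prod.mk.injEq]
      exact ⟨trivial, by omega⟩
    · refine ⟨i, ⟨by omega, by omega⟩, j - i, ⟨by omega, by omega⟩, List.mem_append.2 (Or.inr ?_)⟩
      unfold pvFwd
      have hji : i + (j - i) = j := by omega
      rw [hji, if_pos (by omega), if_pos hw, h]
      simp

lemma pvA_eq (words word_dict : List String) (max_gram : Int) (h : ¬ max_gram ≤ 1) :
    words2dict_tuple words word_dict max_gram = pvAlist words word_dict max_gram := by
  unfold words2dict_tuple
  rw [if_neg h]
  by_cases hw : words = []
  · subst hw
    simp [pvAlist, PySem.List.pyRange_one_eq_nil]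
  · rw [if_neg hw]
    have hinner : ∀ (c : Int) (res : List (Int × Int)),
        (PySem.List.pyRange 1 max_gram 1).foldl (fun res relInd =>
          let res :=
            if 0 ≤ c - relInd then
              let sent := PySem.Str.join "" (PySem.List.slice words (some (c - relInd)) (some (c + 1)))
              if word_dict.contains sent then res ++ [(c, 2 * (relInd - 1))] else res
            else res
          if c + relInd < PySem.List.len words then
            let sent := PySem.Str.join "" (PySem.List.slice words (some c) (some (c + relInd + 1)))
            if word_dict.contains sent then res ++ [(c, 2 * relInd - 1)] else res
          else res) res
        = res ++ (PySem.List.pyRange 1 max_gram 1).flatMap (fun r =>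
            pvBack words word_dict c r ++ pvFwd words word_dict c r) := by
      intro c res
      have hb : (fun (res : List (Int × Int)) relInd =>
          let res :=
            if 0 ≤ c - relInd then
              let sent := PySem.Str.join "" (PySem.List.slice words (some (c - relInd)) (some (c + 1)))
              if word_dict.contains sent then res ++ [(c, 2 * (relInd - 1))] else res
            else res
          if c + relInd < PySem.List.len words then
            let sent := PySem.Str.join "" (PySem.List.slice words (some c) (some (c + relInd + 1)))
            if word_dict.contains sent then res ++ [(c, 2 * relInd - 1)] else res
          else res)
        = fun res r => res ++ (pvBack words word_dict c r ++ pvFwd words word_dict c r) := by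
        funext res r
        simp only [pvBack, pvFwd, pvWin]
        split_ifs <;> simp_all
      rw [hb, PySem.List.foldl_append_eq_flatMap]
    rw [PySem.List.enumerate_eq_map_pyRange (d := ""), List.foldl_map]
    have hout : (fun (res : List (Int × Int)) (j : Int) =>
        (PySem.List.pyRange 1 max_gram 1).foldl (fun res relInd =>
          let res :=
            if 0 ≤ ((j, PySem.List.pyGetD words j "") : Int × String).1 - relInd then
              let sent := PySem.Str.join "" (PySem.List.slice words (some (((j, PySem.List.pyGetD words j "") : Int × String).1 - relInd)) (some (((j, PySem.List.pyGetD words j "") : Int × String).1 + 1)))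
              if word_dict.contains sent then res ++ [(((j, PySem.List.pyGetD words j "") : Int × String).1, 2 * (relInd - 1))] else res
            else res
          if ((j, PySem.List.pyGetD words j "") : Int × String).1 + relInd < PySem.List.len words then
            let sent := PySem.Str.join "" (PySem.List.slice words (some (((j, PySem.List.pyGetD words j "") : Int × String).1)) (some (((j, PySem.List.pyGetD words j "") : Int × String).1 + relInd + 1)))
            if word_dict.contains sent then res ++ [(((j, PySem.List.pyGetD words j "") : Int × String).1, 2 * relInd - 1)] else res
          else res) res)
      = fun res c => res ++ (PySem.List.pyRange 1 max_gram 1).flatMap (fun r =>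
          pvBack words word_dict c r ++ pvFwd words word_dict c r) := by
      funext res c
      exact hinner c res
    rw [hout, PySem.List.foldl_append_eq_flatMap]
    rfl

lemma pvB_eq (words word_dict : List String) (max_gram : Int) (h : ¬ max_gram ≤ 1) :
    words2dict_tuple_alt words word_dict max_gram =
      PySem.List.sorted2 (pvBlist words word_dict max_gram) (fun p => p.1) (fun p => p.2) := by
  unfold words2dict_tuple_alt
  rw [if_neg h]
  show PySem.List.sorted2
      ((PySem.List.pyRange 0 (PySem.List.len words) 1).foldl (fun res i =>
        (PySem.List.pyRange (i + 1) (min (i + max_gram) (PySem.List.len words)) 1).foldl (fun res j =>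
          if word_dict.contains (PySem.Str.join "" (PySem.List.slice words (some i) (some (j + 1)))) then
            res ++ [(j, 2 * (j - i) - 2), (i, 2 * (j - i) - 1)]
          else res) res) [])
      (fun p => p.1) (fun p => p.2) = _
  congr 1
  have hinner : ∀ (i : Int) (res : List (Int × Int)),
      (PySem.List.pyRange (i + 1) (min (i + max_gram) (PySem.List.len words)) 1).foldl
        (fun res j =>
          if word_dict.contains (PySem.Str.join "" (PySem.List.slice words (some i) (some (j + 1)))) then
            res ++ [(j, 2 * (j - i) - 2), (i, 2 * (j - i) - 1)]
          else res) res
      = res ++ (PySem.List.pyRange (i + 1) (min (i + max_gram) (PySem.List.len words)) 1).flatMap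
          (pvWinE words word_dict i) := by
    intro i res
    have hb : (fun (res : List (Int × Int)) j =>
        if word_dict.contains (PySem.Str.join "" (PySem.List.slice words (some i) (some (j + 1)))) then
          res ++ [(j, 2 * (j - i) - 2), (i, 2 * (j - i) - 1)]
        else res)
      = fun res j => res ++ pvWinE words word_dict i j := by
      funext res j
      simp only [pvWinE, pvWin]
      split_ifs <;> simp
    rw [hb, PySem.List.foldl_append_eq_flatMap]
  have hout : (fun (res : List (Int × Int)) i =>
      (PySem.List.pyRange (i + 1) (min (i + max_gram) (PySem.List.len words)) 1).foldl
        (fun res j =>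
          if word_dict.contains (PySem.Str.join "" (PySem.List.slice words (some i) (some (j + 1)))) then
            res ++ [(j, 2 * (j - i) - 2), (i, 2 * (j - i) - 1)]
          else res) res)
    = fun res i => res ++ (PySem.List.pyRange (i + 1) (min (i + max_gram) (PySem.List.len words)) 1).flatMap (pvWinE words word_dict i) := by
    funext res i; exact hinner i res
  rw [hout, PySem.List.foldl_append_eq_flatMap]
  rfl

lemma pvSorted2_eq_sorted (xs : List (Int × Int)) :
    PySem.List.sorted2 xs (fun p => p.1) (fun p => p.2) = PySem.List.sorted xs pvKey := by
  simp only [PySem.List.sorted2, PySem.List.sorted]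
  have hbefore : (fun (a b : Int × Int) => decide (a.1 < b.1) || (!decide (b.1 < a.1) && decide (a.2 < b.2)))
       = (fun a b => decide (pvKey a < pvKey b)) := by
    funext a b
    simp only [pvKey, Prod.Lex.toLex_lt_toLex]
    rcases lt_trichotomy a.1 b.1 with h | h | h <;> simp [h] <;> omega
  simp only [if_neg (by decide : ¬ (false = true))]
  rw [hbefore]

lemma pvAlist_pairwise (words word_dict : List String) (max_gram : Int) :
    (pvAlist words word_dict max_gram).Pairwise (fun a b => pvKey a < pvKey b) := by
  unfold pvAlist
  rw [List.pairwise_flatMap]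
  constructor
  · intro c _
    rw [List.pairwise_flatMap]
    constructor
    · intro r _
      rw [List.pairwise_append]
      refine ⟨?_, ?_, ?_⟩
      · unfold pvBack; split_ifs <;> simp
      · unfold pvFwd; split_ifs <;> simp
      · intro x hx y hy
        rw [mem_pvBack hx, mem_pvFwd hy]
        simp [pvKey, Prod.Lex.toLex_lt_toLex]
        omega
    · refine (PySem.List.pairwise_lt_pyRange_one 1 max_gram).imp_of_mem ?_
      intro r r' _ _ hrr x hx y hy
      rcases List.mem_append.1 hx with hb | hf <;> rcases List.mem_append.1 hy with hb' | hf'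
      · rw [mem_pvBack hb, mem_pvBack hb']; simp [pvKey, Prod.Lex.toLex_lt_toLex]; omega
      · rw [mem_pvBack hb, mem_pvFwd hf']; simp [pvKey, Prod.Lex.toLex_lt_toLex]; omega
      · rw [mem_pvFwd hf, mem_pvBack hb']; simp [pvKey, Prod.Lex.toLex_lt_toLex]; omega
      · rw [mem_pvFwd hf, mem_pvFwd hf']; simp [pvKey, Prod.Lex.toLex_lt_toLex]; omega
  · refine (PySem.List.pairwise_lt_pyRange_one 0 (PySem.List.len words)).imp_of_mem ?_
    intro c c' _ _ hcc x hx y hy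
    simp only [List.mem_flatMap] at hx hy
    obtain ⟨r, _, hx⟩ := hx
    obtain ⟨r', _, hy⟩ := hy
    have hx1 : x.1 = c := by
      rcases List.mem_append.1 hx with hb | hf
      · rw [mem_pvBack hb]
      · rw [mem_pvFwd hf]
    have hy1 : y.1 = c' := by
      rcases List.mem_append.1 hy with hb | hf
      · rw [mem_pvBack hb]
      · rw [mem_pvFwd hf]
    simp [pvKey, Prod.Lex.toLex_lt_toLex]
    omega

lemma pvBlist_nodup (words word_dict : List String) (max_gram : Int) :
    (pvBlist words word_dict max_gram).Nodup := by
  unfold pvBlist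
  rw [List.nodup_flatMap]
  constructor
  · intro i hi
    rw [List.nodup_flatMap]
    constructor
    · intro j hj
      rw [PySem.List.mem_pyRange_one] at hj
      unfold pvWinE; split_ifs <;> simp [Prod.ext_iff] <;> try omega
    · refine (PySem.List.pairwise_lt_pyRange_one _ _).imp_of_mem ?_
      intro j j' hj hj' hjj
      rw [PySem.List.mem_pyRange_one] at hj hj'
      intro x hx hx'
      rcases mem_pvWinE hx with h | h <;> rcases mem_pvWinE hx' with h' | h' <;>
        rw [h, Prod.ext_iff] at h' <;> simp at h' <;> omega
  · refine (PySem.List.pairwise_lt_pyRange_one _ _).imp_of_mem ?_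
    intro i i' hi hi' hii
    intro x hx hx'
    simp only [List.mem_flatMap] at hx hx'
    obtain ⟨j, hj, hx⟩ := hx
    obtain ⟨j', hj', hx'⟩ := hx'
    rw [PySem.List.mem_pyRange_one] at hj hj'
    rcases mem_pvWinE hx with h | h <;> rcases mem_pvWinE hx' with h' | h' <;>
      rw [h, Prod.ext_iff] at h' <;> simp at h' <;> omega

lemma pvPerm (words word_dict : List String) (max_gram : Int) :
    (pvAlist words word_dict max_gram).Perm (pvBlist words word_dict max_gram) := by
  apply List.perm_of_nodup_nodup_toFinset_eq
  · exact ((pvAlist_pairwise words word_dict max_gram).imp (fun h => ne_of_apply_ne pvKey h.ne))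
  · exact pvBlist_nodup words word_dict max_gram
  · ext p
    simp only [List.mem_toFinset, pvMem_Alist, pvMem_Blist]

-- ===== VERDICT (by name: the statement is the Claim_ definition above) =====
theorem words2dict_tuple_spec : Claim_equal_words2dict_tuple := by
  intro words word_dict max_gram _ hpre
  unfold Spec_words2dict_tuple
  have h : ¬ max_gram ≤ 1 := by unfold Pre_words2dict_tuple at hpre; omega
  rw [pvA_eq words word_dict max_gram h, pvB_eq words word_dict max_gram h,
    pvSorted2_eq_sorted]
  exact (PySem.List.sorted_eq_of_perm_of_pairwise_lt _ _ pvKey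
    (pvPerm words word_dict max_gram) (pvAlist_pairwise words word_dict max_gram)).symm
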